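-- pv_equiv track=rewrite | github.com/lettucebowler/constant-sum | quartet.py | findFourElements
-- ===== SOURCE A (Python) =====
-- def findFourElements(A, total, X):
--     tempList = list()
--     a = len(A)
--     B = list()
--
--     # Fix the first element and find
--     # other three
--     for i in range(0,a-3):
--
--         # Fix the second element and
--         # find other two
--         for j in range(i+1,a-2):
--
--             # Fix the third element
--             # and find the fourth
--             for k in range(j+1,a-1):
--
--                 # find the fourth
--                 for l in range(k+1,a):
--                     tempList = [A[i], A[j], A[k], A[l]]
--                     if sum(tempList) % total == X:
--                         for tempVal in tempList:
--                             A.remove(tempVal)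
--                         return tempList
--                     else:
--                         del tempList
--                         tempList = list()
--     return tempList
-- ===== SOURCE B (Python) =====
-- def findFourElements(A, total, X):
--     n = len(A)
--     if n < 4:
--         return []
--     if X % total != X:
--         # X is not a canonical residue mod total, so no quadruple's sum mod total can equal it
--         return []
--     # bucket the indices by value residue mod total, ascending index order
--     buckets = {}
--     for idx in range(n):
--         buckets.setdefault(A[idx] % total, []).append(idx)
--     for i in range(n - 3):
--         for j in range(i + 1, n - 2):
--             sij = A[i] + A[j]
--             for k in range(j + 1, n - 1):
--                 need = (X - sij - A[k]) % total
--                 b = buckets.get(need, [])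
--                 if b:
--                     # binary search: smallest index in b strictly greater than k
--                     lo, hi = 0, len(b)
--                     while lo < hi:
--                         mid = (lo + hi) // 2
--                         if b[mid] <= k:
--                             lo = mid + 1
--                         else:
--                             hi = mid
--                     if lo < len(b):
--                         quad = [A[i], A[j], A[k], A[b[lo]]]
--                         for v in quad:
--                             A.remove(v)
--                         return quad
--     return []
-- ===== Notes on version B (the rewrite author's own statement) =====
-- stated objective: alternative
-- what changed: B replaces A's innermost linear scan over l by a precomputed dict of residue-class index buckets plus a hand-written binary search for the smallest valid index l > k, and returns [] up front when X is not a canonical residue mod total.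
import Mathlib
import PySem

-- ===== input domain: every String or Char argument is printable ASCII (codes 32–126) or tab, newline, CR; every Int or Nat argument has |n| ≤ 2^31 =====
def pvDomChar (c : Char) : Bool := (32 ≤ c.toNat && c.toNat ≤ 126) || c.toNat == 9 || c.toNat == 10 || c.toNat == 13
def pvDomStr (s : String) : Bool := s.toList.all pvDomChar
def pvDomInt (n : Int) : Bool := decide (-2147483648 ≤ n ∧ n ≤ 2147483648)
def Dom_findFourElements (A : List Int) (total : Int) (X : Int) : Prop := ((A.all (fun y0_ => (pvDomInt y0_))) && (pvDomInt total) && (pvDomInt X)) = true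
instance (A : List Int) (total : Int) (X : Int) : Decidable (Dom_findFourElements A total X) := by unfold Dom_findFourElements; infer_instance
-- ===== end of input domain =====

-- B replaces A's innermost scan by residue-class index buckets + binary search (a different
-- algorithm); both programs also remove the four found values from the caller's list in the
-- same way — the theorems below are about the RETURN value only.

-- ===== PORT A =====
-- All subscripts A[i] are in range wherever they are evaluated, so the default of pyGetD is never taken.
def findFourElements (A : List Int) (total : Int) (X : Int) : List Int :=
  let a : Int := (A.length : Int)
  let quad :=
    (PySem.List.pyRange 0 (a - 3) 1).findSome? (fun i =>
      (PySem.List.pyRange (i + 1) (a - 2) 1).findSome? (fun j =>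
        (PySem.List.pyRange (j + 1) (a - 1) 1).findSome? (fun k =>
          (PySem.List.pyRange (k + 1) a 1).findSome? (fun l =>
            let tempList := [PySem.List.pyGetD A i 0, PySem.List.pyGetD A j 0,
                             PySem.List.pyGetD A k 0, PySem.List.pyGetD A l 0]
            if PySem.Int.mod tempList.sum total = X then some tempList else none))))
  match quad with
  | some t => t
  | none => []

-- ===== PORT B =====
-- Source B's hand-written lower-bound binary search (`while lo < hi: ...`); lo, hi, mid are
-- non-negative Python ints, so Nat with Nat division is exact for `(lo + hi) // 2`.
def lbSearch (b : List Int) (k : Int) (lo hi : Nat) : Nat :=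
  if lo < hi then
    if b.getD ((lo + hi) / 2) 0 ≤ k then lbSearch b k ((lo + hi) / 2 + 1) hi
    else lbSearch b k lo ((lo + hi) / 2)
  else lo
termination_by hi - lo
decreasing_by all_goals omega

def findFourElements_alt (A : List Int) (total : Int) (X : Int) : List Int :=
  let n : Int := (A.length : Int)
  if n < 4 then []
  else if PySem.Int.mod X total ≠ X then []
  else
    let buckets :=
      (PySem.List.pyRange 0 n 1).foldl
        (fun d idx => d.modify (PySem.Int.mod (PySem.List.pyGetD A idx 0) total) []
          (fun xs => xs ++ [idx]))
        PySem.Dict.empty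
    let quad :=
      (PySem.List.pyRange 0 (n - 3) 1).findSome? (fun i =>
        (PySem.List.pyRange (i + 1) (n - 2) 1).findSome? (fun j =>
          let sij := PySem.List.pyGetD A i 0 + PySem.List.pyGetD A j 0
          (PySem.List.pyRange (j + 1) (n - 1) 1).findSome? (fun k =>
            let need := PySem.Int.mod (X - sij - PySem.List.pyGetD A k 0) total
            let b := buckets.getD need []
            if b.isEmpty then none
            else
              let lo := lbSearch b k 0 b.length
              if lo < b.length then
                some [PySem.List.pyGetD A i 0, PySem.List.pyGetD A j 0,
                      PySem.List.pyGetD A k 0, PySem.List.pyGetD A (b.getD lo 0) 0]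
              else none)))
    match quad with
    | some q => q
    | none => []

-- ===== PRECONDITION & SPEC =====
-- Pre_ excludes exactly the inputs where A raises ZeroDivisionError: total == 0 while the
-- loops reach a quadruple, i.e. len(A) >= 4.
def Pre_findFourElements (A : List Int) (total : Int) (X : Int) : Prop :=
  3 < A.length → 1 ≤ total.natAbs
instance (A : List Int) (total : Int) (X : Int) : Decidable (Pre_findFourElements A total X) := by unfold Pre_findFourElements; infer_instance

def pvWitness_findFourElements : List Int × Int × Int := ([1, 2, 3, 4], 5, 0)

def Spec_findFourElements (A : List Int) (total : Int) (X : Int) (out : List Int) : Prop := out = findFourElements_alt A total X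
instance (A : List Int) (total : Int) (X : Int) (out : List Int) : Decidable (Spec_findFourElements A total X out) := by unfold Spec_findFourElements; infer_instance

-- ===== CLAIM (what is proved, stated in full; the proofs are below) =====
def Claim_equal_findFourElements : Prop := ∀ (A : List Int) (total : Int) (X : Int), Dom_findFourElements A total X → Pre_findFourElements A total X → Spec_findFourElements A total X (findFourElements A total X)

-- ===== LEMMAS AND PROOFS =====

-- t divides a - (a % t)  (Python %)
theorem pvMod_sub_dvd (a t : Int) : t ∣ (a - PySem.Int.mod a t) := by
  refine ⟨PySem.Int.floordiv a t, ?_⟩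
  have h := PySem.Int.floordiv_mul_add_mod a t
  linarith [mul_comm (PySem.Int.floordiv a t) t]

-- Python % congruence: equal residues iff the difference is divisible
theorem pvMod_eq_mod_iff (a b t : Int) (ht : t ≠ 0) :
    PySem.Int.mod a t = PySem.Int.mod b t ↔ t ∣ (a - b) := by
  constructor
  · intro h
    have h1 := pvMod_sub_dvd a t
    have h2 := pvMod_sub_dvd b t
    have e : a - b = (a - PySem.Int.mod a t) - (b - PySem.Int.mod b t) := by rw [h]; ring
    rw [e]; exact dvd_sub h1 h2
  · intro h
    have h1 := pvMod_sub_dvd a t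
    have h2 := pvMod_sub_dvd b t
    have hd : t ∣ (PySem.Int.mod a t - PySem.Int.mod b t) := by
      have e : PySem.Int.mod a t - PySem.Int.mod b t
          = (a - b) - (a - PySem.Int.mod a t) + (b - PySem.Int.mod b t) := by ring
      rw [e]; exact dvd_add (dvd_sub h h1) h2
    have hb : |PySem.Int.mod a t - PySem.Int.mod b t| < |t| := by
      rcases lt_trichotomy t 0 with hlt | h0 | hgt
      · have ha := PySem.Int.mod_neg_bounds a hlt
        have hbb := PySem.Int.mod_neg_bounds b hlt
        rw [abs_lt, abs_of_neg hlt]; omega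
      · exact absurd h0 ht
      · have ha1 := PySem.Int.mod_nonneg a hgt
        have ha2 := PySem.Int.mod_lt a hgt
        have hb1 := PySem.Int.mod_nonneg b hgt
        have hb2 := PySem.Int.mod_lt b hgt
        rw [abs_lt, abs_of_pos hgt]; omega
    have h0 := Int.eq_zero_of_abs_lt_dvd ((abs_dvd t _).mpr hd) hb
    omega

theorem pvMod_mod (a t : Int) (ht : t ≠ 0) :
    PySem.Int.mod (PySem.Int.mod a t) t = PySem.Int.mod a t := by
  refine (pvMod_eq_mod_iff _ _ _ ht).mpr ?_
  have h := (pvMod_sub_dvd a t).neg_right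
  simpa [neg_sub] using h

-- when X is not a canonical residue, no residue equals it
theorem pvCond_never (y t X : Int) (ht : t ≠ 0) (hX : PySem.Int.mod X t ≠ X) :
    PySem.Int.mod y t ≠ X := by
  intro h
  apply hX
  calc PySem.Int.mod X t = PySem.Int.mod (PySem.Int.mod y t) t := by rw [h]
    _ = PySem.Int.mod y t := pvMod_mod y t ht
    _ = X := h

-- A's quadruple test rewritten to B's bucket-residue test
theorem pvCond_iff (s x X t : Int) (ht : t ≠ 0) (hX : PySem.Int.mod X t = X) :
    (PySem.Int.mod (s + x) t = X ↔ PySem.Int.mod x t = PySem.Int.mod (X - s) t) := by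
  constructor
  · intro h
    refine (pvMod_eq_mod_iff x (X - s) t ht).mpr ?_
    have h1 : t ∣ ((s + x) - X) := by
      have := pvMod_sub_dvd (s + x) t
      rwa [h] at this
    have e : x - (X - s) = (s + x) - X := by ring
    rw [e]; exact h1
  · intro h
    have h1 : t ∣ ((s + x) - X) := by
      have h2 := (pvMod_eq_mod_iff x (X - s) t ht).mp h
      have e : (s + x) - X = x - (X - s) := by ring
      rw [e]; exact h2
    have := (pvMod_eq_mod_iff (s + x) X t ht).mpr h1
    rw [this, hX]

theorem pvFindSome?_ite {a b : Type} (l : List a) (p : a → Prop) [DecidablePred p] (f : a → b) :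
    l.findSome? (fun x => if p x then some (f x) else none) = (l.find? (fun x => decide (p x))).map f := by
  induction l with
  | nil => rfl
  | cons x tl ih =>
    by_cases h : p x
    · simp [h]
    · simp [h, ih]

theorem pvFindSome?_congr {a b : Type} (l : List a) (f g : a → Option b)
    (h : ∀ x ∈ l, f x = g x) : l.findSome? f = l.findSome? g := by
  induction l with
  | nil => rfl
  | cons x tl ih =>
    simp only [List.findSome?_cons, h x (by simp)]
    cases g x with
    | some v => rfl
    | none => exact ih fun y hy => h y (by simp [hy])

theorem pvFind?_all {a : Type} (l : List a) (p : a → Bool) (h : ∀ x ∈ l, p x = true) :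
    l.find? p = l.head? := by
  cases l with
  | nil => rfl
  | cons x tl => simp [h x (by simp)]

-- the bucket dict characterised: bucket r = indices of residue r, ascending
theorem pvBucket_getD (A : List Int) (t n r : Int) :
    ((PySem.List.pyRange 0 n 1).foldl
        (fun d idx => d.modify (PySem.Int.mod (PySem.List.pyGetD A idx 0) t) []
          (fun xs => xs ++ [idx])) PySem.Dict.empty).getD r []
      = (PySem.List.pyRange 0 n 1).filter
          (fun idx => PySem.Int.mod (PySem.List.pyGetD A idx 0) t == r) := by
  rw [← List.foldl_map
        (f := fun idx => (PySem.Int.mod (PySem.List.pyGetD A idx 0) t, idx))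
        (g := fun d (p : Int × Int) => PySem.Dict.modify d p.1 [] (fun xs => xs ++ [p.2]))]
  rw [PySem.Dict.getD_foldl_modify_append]
  simp [List.filter_map, List.map_map, Function.comp_def]

-- Source B's binary-search loop: invariant
theorem pvLb_inv (b : List Int) (k : Int) (hs : b.Pairwise (· < ·)) :
    ∀ (d lo hi : Nat), hi - lo = d → lo ≤ hi → hi ≤ b.length →
      (∀ m (h : m < b.length), m < lo → b[m] ≤ k) →
      (∀ m (h : m < b.length), hi ≤ m → k < b[m]) →
      lbSearch b k lo hi ≤ b.length ∧
      (∀ m (h : m < b.length), m < lbSearch b k lo hi → b[m] ≤ k) ∧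
      (∀ m (h : m < b.length), lbSearch b k lo hi ≤ m → k < b[m]) := by
  intro d
  induction d using Nat.strong_induction_on with
  | _ d ih =>
    intro lo hi hd hle hhi hlow hhigh
    rw [lbSearch]
    by_cases h : lo < hi
    · simp only [h, if_true]
      have hmid : (lo + hi) / 2 < b.length := by omega
      rw [List.getD_eq_getElem b 0 hmid]
      have hmono := List.pairwise_iff_getElem.mp hs
      by_cases hc : b[(lo + hi) / 2] ≤ k
      · simp only [hc, if_true]
        refine ih (hi - ((lo + hi) / 2 + 1)) (by omega) _ _ rfl (by omega) hhi ?_ hhigh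
        intro m hm hlt
        by_cases hmlo : m < lo
        · exact hlow m hm hmlo
        · by_cases hmm : m = (lo + hi) / 2
          · subst hmm; exact hc
          · have : b[m] < b[(lo + hi) / 2] := hmono m _ hm hmid (by omega)
            omega
      · simp only [hc, if_false]
        refine ih ((lo + hi) / 2 - lo) (by omega) _ _ rfl (by omega) (by omega) hlow ?_
        intro m hm hge
        by_cases hmm : m = (lo + hi) / 2
        · subst hmm; omega
        · have : b[(lo + hi) / 2] < b[m] := hmono _ m hmid hm (by omega)
          omega
    · simp only [h, if_false]
      have : lo = hi := by omega
      exact ⟨by omega, fun m hm hlt => hlow m hm hlt, fun m hm hge => hhigh m hm (by omega)⟩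

theorem pvBoundary_find? : ∀ (b : List Int) (k : Int) (r : Nat), r ≤ b.length →
    (∀ m (h : m < b.length), m < r → b[m] ≤ k) →
    (∀ m (h : m < b.length), r ≤ m → k < b[m]) →
    b[r]? = b.find? (fun x => decide (k < x)) := by
  intro b
  induction b with
  | nil => intro k r _ _ _; simp
  | cons x tl ih =>
    intro k r hr hlow hhigh
    cases r with
    | zero =>
      have hx : k < x := hhigh 0 (by simp) (by omega)
      simp [hx]
    | succ r' =>
      have hx : x ≤ k := hlow 0 (by simp) (by omega)
      have hx' : ¬ (k < x) := by omega
      rw [List.find?_cons_of_neg (by simpa using hx')]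
      simp only [List.getElem?_cons_succ]
      exact ih k r' (by simpa using hr)
        (fun m hm hlt => by simpa using hlow (m + 1) (by simpa using hm) (by omega))
        (fun m hm hge => by simpa using hhigh (m + 1) (by simpa using hm) (by omega))

theorem pvLb_find (b : List Int) (k : Int) (hs : b.Pairwise (· < ·)) :
    b[lbSearch b k 0 b.length]? = b.find? (fun x => decide (k < x)) := by
  obtain ⟨h1, h2, h3⟩ := pvLb_inv b k hs (b.length - 0) 0 b.length rfl (by omega) le_rfl
    (fun m h hm => absurd hm (by omega)) (fun m h hm => absurd hm (by omega))
  exact pvBoundary_find? b k _ h1 h2 h3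

-- B's inner step (bucket emptiness test + binary search) is a find? of the first index > k
theorem pvBSide (b : List Int) (k : Int) (hs : b.Pairwise (· < ·)) (f : Int → List Int) :
    (if b.isEmpty then none
     else if lbSearch b k 0 b.length < b.length then
       some (f (b.getD (lbSearch b k 0 b.length) 0))
     else none)
    = (b.find? (fun x => decide (k < x))).map f := by
  by_cases hb : b.isEmpty
  · rw [if_pos hb, List.isEmpty_iff.mp hb]; rfl
  · rw [if_neg hb]
    have hlf := pvLb_find b k hs
    by_cases hlo : lbSearch b k 0 b.length < b.length
    · rw [if_pos hlo, List.getD_eq_getElem b 0 hlo]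
      rw [List.getElem?_eq_getElem hlo] at hlf
      rw [← hlf]; rfl
    · rw [if_neg hlo]
      rw [List.getElem?_eq_none (by omega)] at hlf
      rw [← hlf]; rfl

-- A's innermost scan is the same find?, over the residue bucket
theorem pvASide (A : List Int) (t X n i j k : Int) (ht : t ≠ 0)
    (hX : PySem.Int.mod X t = X) (hk0 : 0 ≤ k) (hkn : k + 1 ≤ n) :
    (PySem.List.pyRange (k + 1) n 1).findSome? (fun l =>
        if PySem.Int.mod ([PySem.List.pyGetD A i 0, PySem.List.pyGetD A j 0,
            PySem.List.pyGetD A k 0, PySem.List.pyGetD A l 0].sum) t = X then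
          some [PySem.List.pyGetD A i 0, PySem.List.pyGetD A j 0,
                PySem.List.pyGetD A k 0, PySem.List.pyGetD A l 0]
        else none)
    = (((PySem.List.pyRange 0 n 1).filter (fun idx =>
          PySem.Int.mod (PySem.List.pyGetD A idx 0) t
            == PySem.Int.mod (X - (PySem.List.pyGetD A i 0 + PySem.List.pyGetD A j 0)
                 - PySem.List.pyGetD A k 0) t)).find? (fun x => decide (k < x))).map
        (fun l => [PySem.List.pyGetD A i 0, PySem.List.pyGetD A j 0,
                   PySem.List.pyGetD A k 0, PySem.List.pyGetD A l 0]) := by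
  rw [pvFindSome?_ite]
  have hpred : (fun l => decide (PySem.Int.mod ([PySem.List.pyGetD A i 0, PySem.List.pyGetD A j 0,
            PySem.List.pyGetD A k 0, PySem.List.pyGetD A l 0].sum) t = X))
      = (fun idx => PySem.Int.mod (PySem.List.pyGetD A idx 0) t
            == PySem.Int.mod (X - (PySem.List.pyGetD A i 0 + PySem.List.pyGetD A j 0)
                 - PySem.List.pyGetD A k 0) t) := by
    funext l
    have e : [PySem.List.pyGetD A i 0, PySem.List.pyGetD A j 0,
        PySem.List.pyGetD A k 0, PySem.List.pyGetD A l 0].sum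
        = (PySem.List.pyGetD A i 0 + PySem.List.pyGetD A j 0 + PySem.List.pyGetD A k 0)
          + PySem.List.pyGetD A l 0 := by
      simp [List.sum_cons]; ring
    rw [e]
    have hiff := pvCond_iff (PySem.List.pyGetD A i 0 + PySem.List.pyGetD A j 0
        + PySem.List.pyGetD A k 0) (PySem.List.pyGetD A l 0) X t ht hX
    have e2 : X - (PySem.List.pyGetD A i 0 + PySem.List.pyGetD A j 0
        + PySem.List.pyGetD A k 0) = X - (PySem.List.pyGetD A i 0 + PySem.List.pyGetD A j 0)
        - PySem.List.pyGetD A k 0 := by ring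
    rw [e2] at hiff
    rw [Bool.eq_iff_iff]
    simp only [decide_eq_true_eq, beq_iff_eq]
    exact hiff
  rw [hpred]
  rw [PySem.List.pyRange_one_append 0 (k + 1) n (by omega) hkn, List.filter_append]
  congr 1
  rw [List.find?_append]
  have h1 : (((PySem.List.pyRange 0 (k + 1)).filter (fun idx =>
          PySem.Int.mod (PySem.List.pyGetD A idx 0) t
            == PySem.Int.mod (X - (PySem.List.pyGetD A i 0 + PySem.List.pyGetD A j 0)
                 - PySem.List.pyGetD A k 0) t)).find? (fun x => decide (k < x))) = none := by
    rw [List.find?_eq_none]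
    intro x hx
    have hm := (PySem.List.mem_pyRange_one.mp (List.mem_filter.mp hx).1).2
    simp only [decide_eq_true_eq]
    omega
  rw [h1, Option.none_or]
  rw [pvFind?_all ((PySem.List.pyRange (k + 1) n).filter (fun idx =>
        PySem.Int.mod (PySem.List.pyGetD A idx 0) t
          == PySem.Int.mod (X - (PySem.List.pyGetD A i 0 + PySem.List.pyGetD A j 0)
               - PySem.List.pyGetD A k 0) t)) (fun x => decide (k < x))
    (fun x hx => by
      have hm := (PySem.List.mem_pyRange_one.mp (List.mem_filter.mp hx).1).1
      simp only [decide_eq_true_eq]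
      omega)]
  rw [List.head?_filter]



-- ===== VERDICT (by name: the statement is the Claim_ definition above) =====
theorem findFourElements_spec : Claim_equal_findFourElements := by
  unfold Claim_equal_findFourElements
  intro A total X hDom hPre
  unfold Spec_findFourElements findFourElements findFourElements_alt
  dsimp only
  by_cases h4 : (A.length : Int) < 4
  · rw [if_pos h4, PySem.List.pyRange_one_eq_nil (by omega : (A.length : Int) - 3 ≤ 0)]
    rfl
  · have ht : total ≠ 0 := by
      have := hPre (by omega)
      omega
    rw [if_neg h4]
    by_cases hX : PySem.Int.mod X total = X
    · rw [if_neg (by simpa using hX)]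
      have hquad :
          (PySem.List.pyRange 0 ((A.length : Int) - 3) 1).findSome? (fun i =>
            (PySem.List.pyRange (i + 1) ((A.length : Int) - 2) 1).findSome? (fun j =>
              (PySem.List.pyRange (j + 1) ((A.length : Int) - 1) 1).findSome? (fun k =>
                (PySem.List.pyRange (k + 1) (A.length : Int) 1).findSome? (fun l =>
                  if PySem.Int.mod ([PySem.List.pyGetD A i 0, PySem.List.pyGetD A j 0,
                      PySem.List.pyGetD A k 0, PySem.List.pyGetD A l 0].sum) total = X then
                    some [PySem.List.pyGetD A i 0, PySem.List.pyGetD A j 0,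
                          PySem.List.pyGetD A k 0, PySem.List.pyGetD A l 0]
                  else none))))
          = (PySem.List.pyRange 0 ((A.length : Int) - 3) 1).findSome? (fun i =>
              (PySem.List.pyRange (i + 1) ((A.length : Int) - 2) 1).findSome? (fun j =>
                (PySem.List.pyRange (j + 1) ((A.length : Int) - 1) 1).findSome? (fun k =>
                  let need := PySem.Int.mod (X - (PySem.List.pyGetD A i 0
                      + PySem.List.pyGetD A j 0) - PySem.List.pyGetD A k 0) total
                  let b := ((PySem.List.pyRange 0 (A.length : Int) 1).foldl
                      (fun d idx => d.modify (PySem.Int.mod (PySem.List.pyGetD A idx 0) total) []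
                        (fun xs => xs ++ [idx])) PySem.Dict.empty).getD need []
                  if b.isEmpty then none
                  else
                    let lo := lbSearch b k 0 b.length
                    if lo < b.length then
                      some [PySem.List.pyGetD A i 0, PySem.List.pyGetD A j 0,
                            PySem.List.pyGetD A k 0, PySem.List.pyGetD A (b.getD lo 0) 0]
                    else none))) := by
        apply pvFindSome?_congr
        intro i hi
        apply pvFindSome?_congr
        intro j hj
        apply pvFindSome?_congr
        intro k hk
        have hkb := PySem.List.mem_pyRange_one.mp hk
        have hjb := PySem.List.mem_pyRange_one.mp hj
        have hib := PySem.List.mem_pyRange_one.mp hi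
        simp only [pvBucket_getD]
        rw [pvASide A total X (A.length : Int) i j k ht hX (by omega) (by omega)]
        rw [pvBSide ((PySem.List.pyRange 0 (A.length : Int) 1).filter (fun idx =>
              PySem.Int.mod (PySem.List.pyGetD A idx 0) total
                == PySem.Int.mod (X - (PySem.List.pyGetD A i 0 + PySem.List.pyGetD A j 0)
                     - PySem.List.pyGetD A k 0) total)) k
          (List.Pairwise.sublist List.filter_sublist
            (PySem.List.pairwise_lt_pyRange_one 0 _))
          (fun l => [PySem.List.pyGetD A i 0, PySem.List.pyGetD A j 0,
                     PySem.List.pyGetD A k 0, PySem.List.pyGetD A l 0])]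
      rw [hquad]
    · rw [if_pos (by simpa using hX)]
      have hnone :
          (PySem.List.pyRange 0 ((A.length : Int) - 3) 1).findSome? (fun i =>
            (PySem.List.pyRange (i + 1) ((A.length : Int) - 2) 1).findSome? (fun j =>
              (PySem.List.pyRange (j + 1) ((A.length : Int) - 1) 1).findSome? (fun k =>
                (PySem.List.pyRange (k + 1) (A.length : Int) 1).findSome? (fun l =>
                  if PySem.Int.mod ([PySem.List.pyGetD A i 0, PySem.List.pyGetD A j 0,
                      PySem.List.pyGetD A k 0, PySem.List.pyGetD A l 0].sum) total = X then
                    some [PySem.List.pyGetD A i 0, PySem.List.pyGetD A j 0,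
                          PySem.List.pyGetD A k 0, PySem.List.pyGetD A l 0]
                  else none)))) = none := by
        rw [List.findSome?_eq_none_iff]
        intro i _
        rw [List.findSome?_eq_none_iff]
        intro j _
        rw [List.findSome?_eq_none_iff]
        intro k _
        rw [List.findSome?_eq_none_iff]
        intro l _
        exact if_neg (pvCond_never _ total X ht hX)
      rw [hnone]
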